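-- pv_equiv track=rewrite | github.com/rowingishikawadev-del/masters-regatta-2026 | scripts/import_entries.py | choose_known_affiliation
-- ===== SOURCE A (Python) =====
-- def choose_known_affiliation(value: str, known_affiliations: set[str]) -> str | None:
--     matches = [
--         affiliation
--         for affiliation in known_affiliations
--         if value == affiliation or value.startswith(f"{affiliation} ")
--     ]
--     if not matches:
--         return None
--     return max(matches, key=len)
-- ===== SOURCE B (Python) =====
-- def choose_known_affiliation(value, known_affiliations):
--     known = set(known_affiliations)
--     if value in known:
--         return value
--     for i in range(len(value) - 1, -1, -1):
--         if value[i] == ' ' and value[:i] in known: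
--             return value[:i]
--     return None
-- ===== Notes on version B (the rewrite author's own statement) =====
-- stated objective: alternative
-- what changed: Instead of testing every known affiliation against value and taking the longest match, B builds a hash set once and scans value's word-boundary prefixes from longest to shortest, returning the first one found in the set.
import Mathlib
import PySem

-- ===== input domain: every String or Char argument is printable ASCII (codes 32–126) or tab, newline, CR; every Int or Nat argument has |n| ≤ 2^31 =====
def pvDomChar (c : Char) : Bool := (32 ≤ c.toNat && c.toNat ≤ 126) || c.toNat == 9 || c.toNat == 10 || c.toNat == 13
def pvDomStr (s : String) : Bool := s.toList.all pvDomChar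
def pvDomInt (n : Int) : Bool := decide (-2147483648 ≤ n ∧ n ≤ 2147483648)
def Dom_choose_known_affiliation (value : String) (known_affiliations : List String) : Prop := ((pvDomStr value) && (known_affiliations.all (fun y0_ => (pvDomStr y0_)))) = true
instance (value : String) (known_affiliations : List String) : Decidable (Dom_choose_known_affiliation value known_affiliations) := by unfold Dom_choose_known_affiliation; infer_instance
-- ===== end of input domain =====

-- B scans value's word-boundary prefixes from longest to shortest against a hash set instead of
-- testing every known affiliation against value (objective: alternative algorithm, same result).

-- ===== PORT A =====
def choose_known_affiliation (value : String) (known_affiliations : List String) : Option String :=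
  let matches_ := known_affiliations.filter
    (fun affiliation => value == affiliation || PySem.Str.startswith value (affiliation ++ " "))
  if matches_.isEmpty then none
  else PySem.List.max? matches_ PySem.Str.len

-- ===== PORT B =====
-- the 'for i in range(len(value)-1, -1, -1): if …: return value[:i]' loop of Source B
def cka_prefix_loop (value : String) (known : PySem.Set String) : List Int → Option String
  | [] => none
  | i :: rest =>
      if PySem.Str.pyGet? value i == some ' '
          && PySem.Set.contains known (PySem.Str.slice value none (some i)) then
        some (PySem.Str.slice value none (some i))
      else cka_prefix_loop value known rest

def choose_known_affiliation_alt (value : String) (known_affiliations : List String) : Option String :=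
  let known := PySem.Set.ofList known_affiliations
  if PySem.Set.contains known value then some value
  else cka_prefix_loop value known (PySem.List.pyRange (PySem.Str.len value - 1) (-1) (-1))

-- ===== PRECONDITION & SPEC =====
def Spec_choose_known_affiliation (value : String) (known_affiliations : List String) (out : Option String) : Prop := out = choose_known_affiliation_alt value known_affiliations
instance (value : String) (known_affiliations : List String) (out : Option String) : Decidable (Spec_choose_known_affiliation value known_affiliations out) := by unfold Spec_choose_known_affiliation; infer_instance

-- ===== CLAIM (what is proved, stated in full; the proofs are below) =====
def Claim_equal_choose_known_affiliation : Prop := ∀ (value : String) (known_affiliations : List String), Dom_choose_known_affiliation value known_affiliations → Spec_choose_known_affiliation value known_affiliations (choose_known_affiliation value known_affiliations)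

-- ===== LEMMAS AND PROOFS =====

-- A string matches_ iff it equals value or is a word-boundary proper prefix of value.
def ckaMatch (value aff : String) : Prop :=
  aff = value ∨ aff.toList ++ [' '] <+: value.toList

-- cond i: index i of value is a space and value[:i] is a known affiliation
def ckaCond (value : String) (kas : List String) (i : Nat) : Prop :=
  value.toList[i]? = some ' ' ∧ String.ofList (value.toList.take i) ∈ kas

theorem append_singleton_prefix_iff {l m : List Char} {c : Char} :
    l ++ [c] <+: m ↔ (l <+: m ∧ m[l.length]? = some c) := by
  constructor
  · rintro ⟨t, ht⟩
    subst ht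
    exact ⟨⟨c :: t, by simp⟩, by simp⟩
  · rintro ⟨⟨t, ht⟩, hc⟩
    subst ht
    cases t with
    | nil => simp at hc
    | cons c' t' =>
      simp at hc
      exact ⟨t', by simp [hc]⟩

theorem ckaMatchB_iff (value aff : String) :
    (value == aff || PySem.Str.startswith value (aff ++ " ")) = true ↔ ckaMatch value aff := by
  simp [PySem.Str.startswith, PySem.Chars.startswith_iff, ckaMatch]
  constructor
  · rintro (h | h)
    · exact Or.inl h.symm
    · exact Or.inr (by simpa using h)
  · rintro (h | h)
    · exact Or.inl h.symm
    · exact Or.inr (by simpa using h)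

theorem ckaMatch_take {value aff : String} (h : ckaMatch value aff) :
    aff.toList = value.toList.take aff.toList.length := by
  rcases h with h | h
  · subst h; simp
  · exact List.prefix_iff_eq_take.mp (append_singleton_prefix_iff.mp h).1

theorem ckaMatch_len_le {value aff : String} (h : ckaMatch value aff) :
    aff.toList.length ≤ value.toList.length := by
  have := congrArg List.length (ckaMatch_take h)
  rw [List.length_take] at this
  omega

theorem ckaMatch_eq_of_len_eq {value a b : String} (ha : ckaMatch value a) (hb : ckaMatch value b)
    (hlen : a.toList.length = b.toList.length) : a = b := by
  have h1 := ckaMatch_take ha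
  have h2 := ckaMatch_take hb
  rw [hlen] at h1
  have : a.toList = b.toList := h1.trans h2.symm
  have := congrArg String.ofList this
  simpa using this

theorem ckaMatch_full {value aff : String} (h : ckaMatch value aff)
    (hlen : aff.toList.length = value.toList.length) : aff = value := by
  exact ckaMatch_eq_of_len_eq h (Or.inl rfl) (by simpa using hlen)

theorem ckaMatch_of_lt {value aff : String} (h : ckaMatch value aff)
    (hlt : aff.toList.length < value.toList.length) :
    value.toList[aff.toList.length]? = some ' ' ∧
      aff = String.ofList (value.toList.take aff.toList.length) := by
  rcases h with h | h
  · subst h; omega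
  · refine ⟨(append_singleton_prefix_iff.mp h).2, ?_⟩
    have := ckaMatch_take (Or.inr h : ckaMatch value aff)
    rw [← this]
    simp
-- match of value at index i with a space
theorem ckaMatch_of_cond {value : String} {kas : List String} {i : Nat}
    (hi : i ≤ value.toList.length) (hc : ckaCond value kas i) :
    ckaMatch value (String.ofList (value.toList.take i)) ∧
      (String.ofList (value.toList.take i)).toList.length = i := by
  have hlen : (String.ofList (value.toList.take i)).toList.length = i := by
    rw [String.toList_ofList, List.length_take]
    omega
  refine ⟨Or.inr ?_, hlen⟩
  rw [append_singleton_prefix_iff]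
  constructor
  · simpa using List.take_prefix i value.toList
  · rw [hlen]; simpa using hc.1

-- ===== A-side characterization =====

theorem cka_foldl_isSome {α : Type} {f : Option α → α → Option α}
    (hf : ∀ a b, (f (some a) b).isSome = true) :
    ∀ (l : List α) (m : α), (l.foldl f (some m)).isSome = true := by
  intro l
  induction l with
  | nil => intro m; rfl
  | cons y l ih =>
    intro m
    rw [List.foldl_cons]
    obtain ⟨a, ha⟩ := Option.isSome_iff_exists.mp (hf m y)
    rw [ha]
    exact ih a

theorem cka_max?_isSome {xs : List String} (h : xs ≠ []) (key : String → Int) :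
    (PySem.List.max? xs key).isSome := by
  cases xs with
  | nil => exact absurd rfl h
  | cons x xs =>
    unfold PySem.List.max?
    rw [List.foldl_cons]
    show (xs.foldl _ (some x)).isSome = true
    refine cka_foldl_isSome ?_ xs x
    intro a b
    show (if key a < key b then some b else some a).isSome = true
    split <;> rfl

theorem ckaA_eq_some {value : String} {kas : List String} {m : String}
    (hmem : m ∈ kas) (hm : ckaMatch value m)
    (hmax : ∀ aff ∈ kas, ckaMatch value aff → aff.toList.length ≤ m.toList.length) :
    choose_known_affiliation value kas = some m := by
  unfold choose_known_affiliation
  set matches_ := kas.filter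
    (fun affiliation => value == affiliation || PySem.Str.startswith value (affiliation ++ " ")) with hM
  have hmemM : m ∈ matches_ := by
    rw [hM, List.mem_filter]
    exact ⟨hmem, (ckaMatchB_iff value m).mpr hm⟩
  have hne : matches_ ≠ [] := by intro h; rw [h] at hmemM; simp at hmemM
  rw [if_neg (by simpa [List.isEmpty_iff] using hne)]
  obtain ⟨m', hm'⟩ := Option.isSome_iff_exists.mp (cka_max?_isSome hne PySem.Str.len)
  rw [hm']
  have hm'M : m' ∈ matches_ := PySem.List.max?_mem hm'
  have hm'kas : m' ∈ kas := (List.mem_filter.mp hm'M).1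
  have hm'match : ckaMatch value m' := (ckaMatchB_iff value m').mp (List.mem_filter.mp hm'M).2
  have h1 : PySem.Str.len m ≤ PySem.Str.len m' := PySem.List.max?_isMax hm' m hmemM
  have h2 : m'.toList.length ≤ m.toList.length := hmax m' hm'kas hm'match
  have : m'.toList.length = m.toList.length := by
    simp only [PySem.Str.len_eq] at h1
    omega
  rw [ckaMatch_eq_of_len_eq hm'match hm this]

theorem ckaA_eq_none {value : String} {kas : List String}
    (h : ∀ aff ∈ kas, ¬ ckaMatch value aff) :
    choose_known_affiliation value kas = none := by
  unfold choose_known_affiliation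
  have : kas.filter
      (fun affiliation => value == affiliation || PySem.Str.startswith value (affiliation ++ " ")) = [] := by
    rw [List.filter_eq_nil_iff]
    intro aff hmem hb
    exact h aff hmem ((ckaMatchB_iff value aff).mp hb)
  simp only [this]
  rfl

-- ===== B-side characterization =====

-- the descending index list [j-1, j-2, …, 0]
def ckaIdx (j : Nat) : List Int := (List.range j).map (fun k : Nat => (j : Int) - 1 - (k : Int))

theorem ckaIdx_succ (j : Nat) : ckaIdx (j + 1) = (j : Int) :: ckaIdx j := by
  unfold ckaIdx
  rw [List.range_succ_eq_map, List.map_cons, List.map_map]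
  refine List.cons_eq_cons.mpr ⟨by push_cast; ring, ?_⟩
  apply List.map_congr_left
  intro k _
  simp only [Function.comp_apply]
  push_cast
  ring

theorem cka_pyRange_eq (n : Nat) :
    PySem.List.pyRange ((n : Int) - 1) (-1) (-1) = ckaIdx n := by
  unfold PySem.List.pyRange ckaIdx
  rw [if_neg (by norm_num)]
  cases n with
  | zero => norm_num
  | succ n =>
    rw [if_neg (by norm_num), if_pos (by push_cast; omega)]
    have hcount : ((((n + 1 : Nat) : Int) - 1 - -1 + - -1 - 1) / - -1).toNat = n + 1 := by
      push_cast; norm_num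
    rw [hcount]
    apply List.map_congr_left
    intro k _
    push_cast
    ring

-- the Bool test of B's loop body decides ckaCond
theorem cka_cond_bool (value : String) (kas : List String) (j : Nat) :
    ((PySem.Str.pyGet? value ((j : Nat) : Int) == some ' ')
        && PySem.Set.contains (PySem.Set.ofList kas)
            (PySem.Str.slice value none (some ((j : Nat) : Int)))) = true
      ↔ ckaCond value kas j := by
  simp only [Bool.and_eq_true, beq_iff_eq, PySem.Str.pyGet?_natCast, ckaCond,
    PySem.Str.slice, PySem.Chars.slice_eq_listSlice, PySem.Set.contains,
    List.contains_eq_mem, PySem.Set.mem_ofList, decide_eq_true_eq]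
  constructor
  · rintro ⟨h1, h2⟩
    refine ⟨h1, ?_⟩
    have : PySem.List.slice value.toList none (some ((j : Nat) : Int)) = value.toList.take j := by
      simp [pysem]
    rwa [this] at h2
  · rintro ⟨h1, h2⟩
    refine ⟨h1, ?_⟩
    have : PySem.List.slice value.toList none (some ((j : Nat) : Int)) = value.toList.take j := by
      simp [pysem]
    rwa [this]

theorem cka_slice_take (value : String) (j : Nat) :
    PySem.Str.slice value none (some ((j : Nat) : Int)) = String.ofList (value.toList.take j) := by
  simp only [PySem.Str.slice, PySem.Chars.slice_eq_listSlice]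
  congr 1
  simp [pysem]

theorem cka_loop_none {value : String} {kas : List String} (j : Nat)
    (h : ∀ i < j, ¬ ckaCond value kas i) :
    cka_prefix_loop value (PySem.Set.ofList kas) (ckaIdx j) = none := by
  induction j with
  | zero => simp [ckaIdx, cka_prefix_loop]
  | succ j ih =>
    rw [ckaIdx_succ]
    unfold cka_prefix_loop
    rw [if_neg ?_]
    · exact ih (fun i hi => h i (by omega))
    · intro hb
      exact h j (by omega) ((cka_cond_bool value kas j).mp hb)

theorem cka_loop_some {value : String} {kas : List String} (j : Nat) {i : Nat} (hij : i < j)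
    (hc : ckaCond value kas i) (hmax : ∀ i', i < i' → i' < j → ¬ ckaCond value kas i') :
    cka_prefix_loop value (PySem.Set.ofList kas) (ckaIdx j) =
      some (String.ofList (value.toList.take i)) := by
  induction j with
  | zero => omega
  | succ j ih =>
    rw [ckaIdx_succ]
    unfold cka_prefix_loop
    by_cases hi : i = j
    · subst hi
      rw [if_pos ((cka_cond_bool value kas i).mpr hc), cka_slice_take]
    · rw [if_neg ?_]
      · exact ih (by omega) (fun i' h1 h2 => hmax i' h1 (by omega))
      · intro hb
        exact hmax j (by omega) (by omega) ((cka_cond_bool value kas j).mp hb)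

-- ===== the main equivalence =====

theorem cka_main (value : String) (kas : List String) :
    choose_known_affiliation value kas = choose_known_affiliation_alt value kas := by
  unfold choose_known_affiliation_alt
  by_cases hv : value ∈ kas
  · rw [if_pos (by
      simp only [PySem.Set.contains, List.contains_eq_mem, PySem.Set.mem_ofList,
        decide_eq_true_eq]
      exact hv)]
    exact ckaA_eq_some hv (Or.inl rfl) (fun aff _ h => ckaMatch_len_le h)
  · rw [if_neg (by
      simp only [PySem.Set.contains, List.contains_eq_mem, PySem.Set.mem_ofList,
        decide_eq_true_eq]
      exact hv)]
    rw [PySem.Str.len_eq, cka_pyRange_eq]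
    -- every match is now a proper word-boundary prefix
    have hlt : ∀ aff ∈ kas, ckaMatch value aff → aff.toList.length < value.toList.length := by
      intro aff hmem hm
      rcases Nat.lt_or_ge aff.toList.length value.toList.length with h | h
      · exact h
      · have : aff.toList.length = value.toList.length :=
          le_antisymm (ckaMatch_len_le hm) h
        exact absurd (ckaMatch_full hm this ▸ hmem) hv
    haveI : DecidablePred (ckaCond value kas) := fun i => by unfold ckaCond; infer_instance
    by_cases hex : ∃ i, i < value.toList.length ∧ ckaCond value kas i
    · obtain ⟨i, hin, hci⟩ := hex
      set n := value.toList.length with hn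
      set i₀ := Nat.findGreatest (ckaCond value kas) (n - 1) with hi₀
      have hspec : ckaCond value kas i₀ :=
        Nat.findGreatest_spec (m := i) (by omega) hci
      have hle : i₀ ≤ n - 1 := Nat.findGreatest_le (n - 1)
      have hi₀n : i₀ < n := by omega
      rw [cka_loop_some n hi₀n hspec
        (fun i' h1 h2 => Nat.findGreatest_is_greatest h1 (by omega))]
      obtain ⟨hm, hlen⟩ := ckaMatch_of_cond (le_of_lt hi₀n) hspec
      refine ckaA_eq_some hspec.2 hm ?_
      intro aff hmem hmatch
      rw [hlen]
      have haffn : aff.toList.length < n := hlt aff hmem hmatch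
      obtain ⟨hsp, heq⟩ := ckaMatch_of_lt hmatch haffn
      have hcond : ckaCond value kas aff.toList.length := ⟨hsp, heq ▸ hmem⟩
      by_contra hgt
      exact Nat.findGreatest_is_greatest (n := n - 1) (by omega) (by omega) hcond
    · rw [cka_loop_none value.toList.length
        (fun i hi hc => hex ⟨i, hi, hc⟩)]
      refine ckaA_eq_none ?_
      intro aff hmem hmatch
      have haffn := hlt aff hmem hmatch
      obtain ⟨hsp, heq⟩ := ckaMatch_of_lt hmatch haffn
      exact hex ⟨aff.toList.length, haffn, hsp, heq ▸ hmem⟩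

-- ===== VERDICT (by name: the statement is the Claim_ definition above) =====
theorem choose_known_affiliation_spec : Claim_equal_choose_known_affiliation := by
  intro value kas _
  unfold Spec_choose_known_affiliation
  exact cka_main value kas
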